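-- pv_equiv track=rewrite | github.com/harn2412/StockProcess | GetDataQuarter.py | create_year_quarter_header
-- ===== SOURCE A (Python) =====
-- from math import ceil
--
-- def create_year_quarter_header(last_year, last_quarter, how_many):
--     """Tao mot danh sach cac quy va nam dem lui tuong ung voi nam cuoi cung
--     :type last_year: int
--     :type last_quarter: int
--     :type how_many: int
--     """
--
--     dump_quarters = [4, 3, 2, 1]
--     quarters = dump_quarters[-last_quarter:] + dump_quarters[:-last_quarter]
--
--     # Tao chui cac quy tuong ung do dai can thiet
--     long_quarters = quarters * int(ceil(how_many / 4))
--     quarters = long_quarters[:how_many]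
--
--     headers = []
--     for quarter in quarters:
--         if quarter == 4:
--             last_year -= 1
--         header = 'Quý {}-{}'.format(quarter, last_year)
--         headers.append(header)
--
--     headers.reverse()  # de cho dung voi bo cuc cua data
--
--     return headers
-- ===== SOURCE B (Python) =====
-- def create_year_quarter_header(last_year, last_quarter, how_many):
--     """Tao mot danh sach cac quy va nam dem lui tuong ung voi nam cuoi cung
--     :type last_year: int
--     :type last_quarter: int
--     :type how_many: int
--     """
--     dump_quarters = [4, 3, 2, 1]
--     base = dump_quarters[-last_quarter:] + dump_quarters[:-last_quarter]
--     p = base.index(4)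
--     # position i (0-based, forward order) carries quarter base[i % 4] and a year
--     # decremented once per quarter-4 seen so far: that count is (i - p) // 4 + 1.
--     return ['Quý {}-{}'.format(base[i % 4], last_year - ((i - p) // 4 + 1))
--             for i in range(how_many - 1, -1, -1)]
-- ===== Notes on version B (the rewrite author's own statement) =====
-- stated objective: alternative
-- what changed: Replaces A's list replication, stateful year-decrementing loop and final reverse() by a single comprehension over a descending range that computes each quarter as base[i % 4] and each year by the closed-form offset (i - base.index(4)) // 4 + 1.
import Mathlib
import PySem

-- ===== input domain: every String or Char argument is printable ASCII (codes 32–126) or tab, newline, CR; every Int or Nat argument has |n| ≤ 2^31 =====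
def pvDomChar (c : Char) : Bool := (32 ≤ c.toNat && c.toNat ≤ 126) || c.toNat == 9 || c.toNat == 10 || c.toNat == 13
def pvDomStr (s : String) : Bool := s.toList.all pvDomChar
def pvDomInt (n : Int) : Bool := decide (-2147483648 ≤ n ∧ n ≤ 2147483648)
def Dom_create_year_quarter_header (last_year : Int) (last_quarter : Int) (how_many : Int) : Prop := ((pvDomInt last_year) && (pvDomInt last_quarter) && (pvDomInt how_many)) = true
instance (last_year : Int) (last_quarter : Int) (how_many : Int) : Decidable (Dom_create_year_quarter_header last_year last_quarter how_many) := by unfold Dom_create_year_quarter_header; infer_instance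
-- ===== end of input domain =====

-- B replaces A's stateful year-decrementing loop plus final reverse by a single map in
-- reversed order with a closed-form year offset (alternative decomposition, same cost).

-- ===== PORT A =====
def create_year_quarter_header (last_year : Int) (last_quarter : Int) (how_many : Int) : List String :=
  let dump_quarters : List Int := [4, 3, 2, 1]
  let quarters := PySem.List.slice dump_quarters (some (-last_quarter)) none
               ++ PySem.List.slice dump_quarters none (some (-last_quarter))
  -- int(ceil(how_many / 4)): float division by 4 is exact for |how_many| ≤ 2^31,
  -- so this is exactly ceiling division, ported as -((-how_many) // 4)
  let reps : Int := -(PySem.Int.floordiv (-how_many) 4)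
  let long_quarters := (List.replicate reps.toNat quarters).flatten   -- list * n ( [] for n ≤ 0 )
  let quarters2 := PySem.List.slice long_quarters none (some how_many)
  let res := quarters2.foldl (fun (st : Int × List String) q =>
      let y := if q = 4 then st.1 - 1 else st.1
      (y, st.2 ++ ["Quý " ++ PySem.Int.toStr q ++ "-" ++ PySem.Int.toStr y])) (last_year, [])
  res.2.reverse

-- ===== PORT B =====
def create_year_quarter_header_alt (last_year : Int) (last_quarter : Int) (how_many : Int) : List String :=
  let dump_quarters : List Int := [4, 3, 2, 1]
  let base := PySem.List.slice dump_quarters (some (-last_quarter)) none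
           ++ PySem.List.slice dump_quarters none (some (-last_quarter))
  -- base always contains 4, so base.index(4) cannot raise; getD 0 is unreachable
  let p : Int := ((PySem.List.index? base 4).getD 0 : Nat)
  (PySem.List.pyRange (how_many - 1) (-1) (-1)).map (fun i =>
    "Quý " ++ PySem.Int.toStr (PySem.List.pyGetD base (PySem.Int.mod i 4) 0)
      ++ "-" ++ PySem.Int.toStr (last_year - (PySem.Int.floordiv (i - p) 4 + 1)))

-- ===== PRECONDITION & SPEC =====
def Spec_create_year_quarter_header (last_year : Int) (last_quarter : Int) (how_many : Int) (out : List String) : Prop := out = create_year_quarter_header_alt last_year last_quarter how_many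
instance (last_year : Int) (last_quarter : Int) (how_many : Int) (out : List String) : Decidable (Spec_create_year_quarter_header last_year last_quarter how_many out) := by unfold Spec_create_year_quarter_header; infer_instance

-- ===== CLAIM (what is proved, stated in full; the proofs are below) =====
def Claim_equal_create_year_quarter_header : Prop := ∀ (last_year : Int) (last_quarter : Int) (how_many : Int), Dom_create_year_quarter_header last_year last_quarter how_many → Spec_create_year_quarter_header last_year last_quarter how_many (create_year_quarter_header last_year last_quarter how_many)

-- ===== LEMMAS AND PROOFS =====

-- forward header list of A's loop, as a recursive function
def pvHeadersOf (qs : List Int) (y : Int) : List String :=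
  match qs with
  | [] => []
  | q :: t =>
      let y' := if q = 4 then y - 1 else y
      ("Quý " ++ PySem.Int.toStr q ++ "-" ++ PySem.Int.toStr y') :: pvHeadersOf t y'

theorem pvFoldA (qs : List Int) (y : Int) (acc : List String) :
    (qs.foldl (fun (st : Int × List String) q =>
      let y := if q = 4 then st.1 - 1 else st.1
      (y, st.2 ++ ["Quý " ++ PySem.Int.toStr q ++ "-" ++ PySem.Int.toStr y])) (y, acc))
    = (y - (qs.count 4 : Int), acc ++ pvHeadersOf qs y) := by
  induction qs generalizing y acc with
  | nil => simp [pvHeadersOf]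
  | cons q t ih =>
      simp only [List.foldl_cons, List.count_cons, pvHeadersOf, ih]
      by_cases h : q = 4
      · simp [h]
        omega
      · simp [h]

theorem pvHeadersOf_append (l₁ l₂ : List Int) (y : Int) :
    pvHeadersOf (l₁ ++ l₂) y = pvHeadersOf l₁ y ++ pvHeadersOf l₂ (y - (l₁.count 4 : Int)) := by
  induction l₁ generalizing y with
  | nil => simp [pvHeadersOf]
  | cons q t ih =>
      simp only [List.cons_append, pvHeadersOf, List.count_cons, ih]
      by_cases h : q = 4
      · simp [h]
        congr 1
        omega
      · simp [h]

theorem pvComb (b : List Int) (p : Nat) (hp : p < 4)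
    (h4 : ∀ j : Nat, j < 4 → (b.getD j 0 = 4 ↔ j = p)) (n : Nat) (y : Int) :
    pvHeadersOf ((List.range n).map (fun j => b.getD (j % 4) 0)) y
      = (List.range n).map (fun j =>
          "Quý " ++ PySem.Int.toStr (b.getD (j % 4) 0)
            ++ "-" ++ PySem.Int.toStr (y - (((j : Int) + 4 - (p : Int)) / 4)))
    ∧ (((List.range n).map (fun j => b.getD (j % 4) 0)).count 4 : Int)
        = ((n : Int) + 3 - (p : Int)) / 4 := by
  induction n with
  | zero =>
      refine ⟨by simp [pvHeadersOf], ?_⟩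
      simp only [List.range_zero, List.map_nil, List.count_nil, Nat.cast_zero]
      omega
  | succ n ih =>
      obtain ⟨ih1, ih2⟩ := ih
      have hmod : n % 4 < 4 := Nat.mod_lt _ (by omega)
      have h44 := h4 (n % 4) hmod
      have hmi : ((n % 4 : Nat) : Int) = (n : Int) % 4 := by omega
      rw [List.range_succ, List.map_append, List.map_append]
      constructor
      · rw [pvHeadersOf_append, ih1, ih2]
        congr 1
        simp only [List.map_cons, List.map_nil, pvHeadersOf]
        by_cases hc : b.getD (n % 4) 0 = 4
        · have hpe : (n : Int) % 4 = (p : Int) := by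
            have := (h44).1 hc; omega
          rw [if_pos hc]
          have hy : y - ((n : Int) + 3 - (p : Int)) / 4 - 1
              = y - (((n : Int) + 4 - (p : Int)) / 4) := by omega
          rw [hy]
        · have hne : n % 4 ≠ p := fun h => hc ((h44).2 h)
          have hpe : (n : Int) % 4 ≠ (p : Int) := by omega
          rw [if_neg hc]
          have hy : y - ((n : Int) + 3 - (p : Int)) / 4
              = y - (((n : Int) + 4 - (p : Int)) / 4) := by omega
          rw [hy]
      · rw [List.count_append, Nat.cast_add, ih2]
        by_cases hc : b.getD (n % 4) 0 = 4
        · have hpe : (n : Int) % 4 = (p : Int) := by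
            have := (h44).1 hc; omega
          have hct : (List.map (fun j => b.getD (j % 4) 0) [n]).count 4 = 1 := by
            simp only [List.map_cons, List.map_nil]
            rw [hc]
            simp
          rw [hct]
          push_cast
          omega
        · have hne : n % 4 ≠ p := fun h => hc ((h44).2 h)
          have hpe : (n : Int) % 4 ≠ (p : Int) := by omega
          have hct : (List.map (fun j => b.getD (j % 4) 0) [n]).count 4 = 0 := by
            simp only [List.map_cons, List.map_nil]
            rw [List.count_eq_zero, List.mem_singleton]
            exact fun h => hc h.symm
          rw [hct]
          push_cast
          omega

theorem pvMapRange4 (b : List Int) (hb : b.length = 4) :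
    (List.range 4).map (fun j => b.getD (j % 4) 0) = b := by
  apply List.ext_getElem
  · simp [hb]
  · intro i h1 h2
    simp only [List.getElem_map, List.getElem_range]
    rw [Nat.mod_eq_of_lt (by simpa using h1), List.getD_eq_getElem]

theorem pvFlattenRep (b : List Int) (hb : b.length = 4) (K : Nat) :
    (List.replicate K b).flatten = (List.range (4 * K)).map (fun j => b.getD (j % 4) 0) := by
  induction K with
  | zero => simp
  | succ K ih =>
      rw [List.replicate_succ, List.flatten_cons, ih,
          show 4 * (K + 1) = 4 + 4 * K by ring, List.range_add, List.map_append,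
          pvMapRange4 b hb, List.map_map]
      congr 1
      apply List.map_congr_left
      intro j _
      simp [Nat.add_mod_left]

-- the generic core: once base is known (a rotation of [4,3,2,1] with its unique 4 at p), A = B
theorem pvKey (b : List Int) (p : Nat) (hb : b.length = 4) (hp : p < 4)
    (h4 : ∀ j : Nat, j < 4 → (b.getD j 0 = 4 ↔ j = p))
    (hidx : PySem.List.index? b 4 = some p)
    (ly lq hm : Int)
    (hbase : PySem.List.slice ([4, 3, 2, 1] : List Int) (some (-lq)) none
           ++ PySem.List.slice ([4, 3, 2, 1] : List Int) none (some (-lq)) = b) :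
    create_year_quarter_header ly lq hm = create_year_quarter_header_alt ly lq hm := by
  unfold create_year_quarter_header create_year_quarter_header_alt
  simp only [hbase, hidx, Option.getD_some]
  by_cases hpos : 0 < hm
  · -- positive how_many
    have hfd : PySem.Int.floordiv (-hm) 4 = (-hm) / 4 :=
      PySem.Int.floordiv_eq_ediv_of_pos (by norm_num)
    have hK : hm.toNat ≤ 4 * (-((-hm) / 4)).toNat := by omega
    rw [hfd, pvFlattenRep b hb, PySem.List.slice_to _ (by omega), ← List.map_take,
        List.take_range, Nat.min_eq_left hK, pvFoldA, (pvComb b p hp h4 hm.toNat ly).1,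
        PySem.List.pyRange_neg_one, show (hm - 1 - -1).toNat = hm.toNat by omega]
    apply List.ext_getElem
    · simp
    · intro i h1 h2
      simp only [List.getElem_reverse, List.getElem_map, List.getElem_range, List.length_map,
        List.length_range, List.nil_append]
      have hi : i < hm.toNat := by simpa using h1
      have hj : hm - 1 - (i : Int) = ((hm.toNat - 1 - i : Nat) : Int) := by omega
      rw [hj]
      have hmodc : PySem.Int.mod ((hm.toNat - 1 - i : Nat) : Int) 4
          = (((hm.toNat - 1 - i) % 4 : Nat) : Int) := by
        exact_mod_cast PySem.Int.mod_natCast (hm.toNat - 1 - i) 4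
      rw [hmodc, PySem.List.pyGetD_natCast,
          PySem.Int.floordiv_eq_ediv_of_pos (b := 4) (by norm_num)]
      have hy : ly - ((((hm.toNat - 1 - i : Nat) : Int) - (p : Int)) / 4 + 1)
          = ly - ((((hm.toNat - 1 - i : Nat) : Int) + 4 - (p : Int)) / 4) := by omega
      rw [hy]
  · -- how_many ≤ 0: both sides are empty
    have hfd : PySem.Int.floordiv (-hm) 4 = (-hm) / 4 :=
      PySem.Int.floordiv_eq_ediv_of_pos (by norm_num)
    have hK : (-((-hm) / 4)).toNat = 0 := by omega
    rw [hfd, hK]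
    simp only [List.replicate_zero, List.flatten_nil]
    have hsl : PySem.List.slice ([] : List Int) none (some hm) = [] := by
      rcases Int.lt_or_le hm 0 with h | h
      · rw [show hm = -(((-hm).toNat : Nat) : Int) by omega,
            PySem.List.slice_to_neg_natCast _ _ (by omega)]
        simp
      · rw [PySem.List.slice_to _ h]; simp
    rw [hsl, PySem.List.pyRange_neg_one_eq_nil (by omega)]
    simp [List.foldl_nil]

-- ===== VERDICT (by name: the statement is the Claim_ definition above) =====
theorem create_year_quarter_header_spec : Claim_equal_create_year_quarter_header := by
  intro ly lq hm _
  unfold Spec_create_year_quarter_header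
  -- case on last_quarter: the slice pair produces one of the four rotations of [4,3,2,1]
  rcases Int.lt_or_le lq (-4) with h5n | h1
  · -- lq ≤ -5 : base = [4,3,2,1]
    refine pvKey [4,3,2,1] 0 (by decide) (by decide) (by decide) (by decide) ly lq hm ?_
    rw [PySem.List.slice_from _ (by omega : (0:Int) ≤ -lq),
        PySem.List.slice_to _ (by omega : (0:Int) ≤ -lq),
        List.drop_eq_nil_of_le (by simp; omega), List.take_of_length_le (by simp; omega)]
    simp
  · rcases Int.lt_or_le 4 lq with h5p | h2
    · -- lq ≥ 5 : base = [4,3,2,1]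
      refine pvKey [4,3,2,1] 0 (by decide) (by decide) (by decide) (by decide) ly lq hm ?_
      rw [show -lq = -((lq.toNat : Nat) : Int) by omega,
          PySem.List.slice_from_neg_natCast _ _ (by omega),
          PySem.List.slice_to_neg_natCast _ _ (by omega),
          show ([4,3,2,1] : List Int).length - lq.toNat = 0 by simp; omega]
      simp
    · -- -4 ≤ lq ≤ 4 : nine concrete cases
      interval_cases lq
      · exact pvKey [4,3,2,1] 0 (by decide) (by decide) (by decide) (by decide) ly _ hm (by decide)
      · exact pvKey [1,4,3,2] 1 (by decide) (by decide) (by decide) (by decide) ly _ hm (by decide)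
      · exact pvKey [2,1,4,3] 2 (by decide) (by decide) (by decide) (by decide) ly _ hm (by decide)
      · exact pvKey [3,2,1,4] 3 (by decide) (by decide) (by decide) (by decide) ly _ hm (by decide)
      · exact pvKey [4,3,2,1] 0 (by decide) (by decide) (by decide) (by decide) ly _ hm (by decide)
      · exact pvKey [1,4,3,2] 1 (by decide) (by decide) (by decide) (by decide) ly _ hm (by decide)
      · exact pvKey [2,1,4,3] 2 (by decide) (by decide) (by decide) (by decide) ly _ hm (by decide)
      · exact pvKey [3,2,1,4] 3 (by decide) (by decide) (by decide) (by decide) ly _ hm (by decide)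
      · exact pvKey [4,3,2,1] 0 (by decide) (by decide) (by decide) (by decide) ly _ hm (by decide)
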